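-- pv_equiv track=rewrite | github.com/HypnoSphynx/BRAC_University_CS | CSE220/Assignment1/7.py | splitting_array
-- ===== SOURCE A (Python) =====
-- def splitting_array(source):
--     sum=0
--     sum2=0
--     for i in range(len(source)):
--         sum+=source[i]
--         for j in range(i+1,len(source)):
--             sum2+=source[j]
--         if sum==sum2:
--             return True
--         else:
--             if i==len(source)-1:
--                 return False
--             else:
--                 sum2=0
-- ===== SOURCE B (Python) =====
-- def splitting_array(source):
--     total = sum(source)
--     prefix = 0
--     for x in source:
--         prefix += x
--         if 2 * prefix == total:
--             return True
--     return False
-- ===== Notes on version B (the rewrite author's own statement) =====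
-- stated objective: faster
-- what changed: Replaces the O(n^2) per-index recomputation of the suffix sum with one precomputed total and a single running-prefix pass checking 2*prefix == total.
-- outside the precondition, e.g. on splitting_array([]): A returns None, B returns False
import Mathlib
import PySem

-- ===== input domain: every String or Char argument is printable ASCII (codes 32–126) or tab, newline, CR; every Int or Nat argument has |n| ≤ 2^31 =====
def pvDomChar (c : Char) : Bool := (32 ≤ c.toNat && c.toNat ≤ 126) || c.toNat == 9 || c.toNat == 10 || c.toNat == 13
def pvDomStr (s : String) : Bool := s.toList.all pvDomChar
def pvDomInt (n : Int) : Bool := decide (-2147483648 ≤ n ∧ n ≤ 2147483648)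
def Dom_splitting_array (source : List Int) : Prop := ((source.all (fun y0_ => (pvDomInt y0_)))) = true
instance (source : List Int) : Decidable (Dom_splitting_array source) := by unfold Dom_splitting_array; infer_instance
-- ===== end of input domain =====

-- B replaces A's quadratic per-index suffix-sum recomputation with a precomputed total and one
-- running-prefix pass (measured asymptotically faster); Pre_ excludes the empty list, on which A
-- returns None (not a bool).


-- ===== PORT A =====
-- literal transliteration of A's loop over i; `none` is Python's implicit None (only the empty list)
def splittingAuxA (source : List Int) (i : Nat) (sum : Int) : Option Bool :=
  if _h : i < source.length then
    let sum := sum + PySem.List.pyGetD source (i : Int) 0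
    let sum2 := (PySem.List.pyRange ((i : Int) + 1) (PySem.List.len source) 1).foldl
      (fun s j => s + PySem.List.pyGetD source j 0) 0
    if sum = sum2 then some true
    else if i = source.length - 1 then some false
    else splittingAuxA source (i + 1) sum
  else none
termination_by source.length - i

def splitting_array (source : List Int) : Bool :=
  (splittingAuxA source 0 0).getD false  -- the default is never reached under Pre_ (source ≠ [])

-- ===== PORT B =====
def splittingLoopB (total : Int) (pfx : Int) : List Int → Bool
  | [] => false
  | x :: xs =>
    let p := pfx + x
    if 2 * p = total then true else splittingLoopB total p xs

def splitting_array_alt (source : List Int) : Bool :=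
  splittingLoopB source.sum 0 source

-- ===== PRECONDITION & SPEC =====
-- Pre_ excludes only the empty list, on which Python A falls through the loop and returns None, not a bool.
def Pre_splitting_array (source : List Int) : Prop := source ≠ []
instance (source : List Int) : Decidable (Pre_splitting_array source) := by
  unfold Pre_splitting_array; infer_instance
def pvWitness_splitting_array : List Int := [1, 2, 3]

def Spec_splitting_array (source : List Int) (out : Bool) : Prop := out = splitting_array_alt source
instance (source : List Int) (out : Bool) : Decidable (Spec_splitting_array source out) := by
  unfold Spec_splitting_array; infer_instance

-- ===== CLAIM (what is proved, stated in full; the proofs are below) =====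
def Claim_equal_splitting_array : Prop := ∀ (source : List Int), Dom_splitting_array source →
  Pre_splitting_array source → Spec_splitting_array source (splitting_array source)

-- ===== LEMMAS AND PROOFS =====
-- the inner j-loop of A sums exactly the suffix source.drop a
theorem splittingAuxA_inner (source : List Int) (a : Nat) :
    (PySem.List.pyRange (a : Int) (PySem.List.len source) 1).foldl
      (fun s j => s + PySem.List.pyGetD source j 0) 0 = (source.drop a).sum := by
  have h := PySem.List.foldl_pyRange_pyGetD (xs := source) (f := fun s x => s + x) (d := 0)
    (init := (0 : Int)) (a := (a : Int)) (by positivity)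
  simp only at h
  rw [h]
  simp [List.sum_eq_foldl, Int.toNat_natCast]

-- invariant: with pfx the sum of the first i elements, A's remaining loop equals B's loop on the
-- remaining suffix (the running total being pfx + suffix sum)
theorem splittingAuxA_eq (source : List Int) (i : Nat) (pfx : Int) (h : i < source.length) :
    splittingAuxA source i pfx =
      some (splittingLoopB (pfx + (source.drop i).sum) pfx (source.drop i)) := by
  have hdrop : source.drop i = source[i] :: source.drop (i + 1) :=
    (List.getElem_cons_drop h).symm
  rw [splittingAuxA]
  simp only [dif_pos h]
  have hinner : (PySem.List.pyRange ((i : Int) + 1) (PySem.List.len source) 1).foldl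
      (fun s j => s + PySem.List.pyGetD source j 0) 0 = (source.drop (i + 1)).sum := by
    have := splittingAuxA_inner source (i + 1)
    simpa using this
  rw [hinner, hdrop]
  simp only [splittingLoopB, PySem.List.pyGetD_natCast, List.getD_eq_getElem?_getD,
    List.getElem?_eq_getElem h, Option.getD_some, List.sum_cons]
  by_cases hc : pfx + source[i] = (source.drop (i + 1)).sum
  · have : 2 * (pfx + source[i]) = pfx + (source[i] + (source.drop (i + 1)).sum) := by omega
    rw [if_pos hc, if_pos this]
  · have hne : ¬ 2 * (pfx + source[i]) = pfx + (source[i] + (source.drop (i + 1)).sum) := by omega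
    rw [if_neg hc, if_neg hne]
    by_cases hlast : i = source.length - 1
    · have : source.drop (i + 1) = [] := by
        apply List.drop_eq_nil_of_le; omega
      rw [if_pos hlast, this, splittingLoopB]
    · have hlt : i + 1 < source.length := by omega
      rw [if_neg hlast, splittingAuxA_eq source (i + 1) (pfx + source[i]) hlt]
      have : pfx + source[i] + (source.drop (i + 1)).sum
           = pfx + (source[i] + (source.drop (i + 1)).sum) := by ring
      rw [this]
termination_by source.length - i

-- ===== VERDICT (by name: the statement is the Claim_ definition above) =====
theorem splitting_array_spec : Claim_equal_splitting_array := by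
  intro source _hdom hpre
  unfold Spec_splitting_array splitting_array splitting_array_alt
  have h0 : 0 < source.length := List.length_pos_of_ne_nil hpre
  rw [splittingAuxA_eq source 0 0 h0]
  simp
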